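-- pv_equiv track=rewrite | github.com/cylc/cylc-flow | cylc/flow/parsec/util.py | intlistjoin
-- ===== SOURCE A (Python) =====
-- def intlistjoin(lst):
--     """Return dump string for int list.
--
--     Attempt grouping on sequences with 3 or more numbers:
--     * Consider sequential int values in list, group them together in
--       `START..END[..STEP]` syntax where relevant.
--     * Consider same numbers in list, group them together in `N*INT` syntax.
--
--     Arguments:
--         lst (list): a list of int numbers.
--
--     Return (str):
--         The (hopefully) nicely formatted dump string.
--
--     Examples:
--         >>> intlistjoin([])
--         ''
--         >>> intlistjoin([10])
--         '10'
--         >>> intlistjoin([10, 10])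
--         '10, 10'
--         >>> intlistjoin([10, 10, 10])
--         '3*10'
--         >>> intlistjoin([10, 11])
--         '10, 11'
--         >>> intlistjoin([10, 11, 12])
--         '10..12'
--         >>> intlistjoin([-1, 1, 3, 5, 0, 0, 0, 8, 9, 11, -1, 0, 1, 2])
--         '-1..5..2, 3*0, 8, 9, 11, -1..2'
--         >>> intlistjoin([-1, 1, 3, 5, 0, 0, 0, 8, 9, 11, 11, 12])
--         '-1..5..2, 3*0, 8, 9, 11, 11, 12'
--         >>> intlistjoin(
--         ...     [-10, -10, -1, 1, 3, 5, 0, 0, 0, 8, 9, 11, -1, 0, 1, 2])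
--         '-10, -10, -1..5..2, 3*0, 8, 9, 11, -1..2'
--         >>> intlistjoin(
--         ...     [64747, -10, -10, -10, -1, 1, 3, 5, 0, 0, 0, 8, 9, 11, -1, 0,
--         ...      1, 2, 3, 4, 19, 19, 19, 20, 20, 20, 21, 22, 23])
--         '64747, 3*-10, -1..5..2, 3*0, 8, 9, 11, -1..4, 3*19, 3*20, 21..23'
--     """
--     rets = []
--     items = list(lst)
--     while items:
--         group = [items.pop(0)]
--         while items:
--             if (len(group) == 1 or
--                     items[0] - group[-1] == group[-1] - group[-2]):
--                 group.append(items.pop(0))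
--             else:
--                 # If 2 numbers only, return 1 back if grouping still possible
--                 # in subsequent lots.
--                 if len(group) == 2 and len(items) >= 2:
--                     items.insert(0, group.pop())
--                 break
--         if len(group) <= 2:
--             # Less than 2 numbers
--             rets += [str(item) for item in group]
--         elif group[1] - group[0] > 1:
--             # Sequence of numbers with equal steps > 1
--             rets.append(
--                 '%d..%d..%d' % (group[0], group[-1], group[1] - group[0]))
--         elif group[1] - group[0] == 1:
--             # Sequence of incremental numbers
--             rets.append('%d..%d' % (group[0], group[-1]))
--         else:
--             # Sequence of same number
--             rets.append('%d*%d' % (len(group), group[0]))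
--     return ', '.join(rets)
-- ===== SOURCE B (Python) =====
-- def intlistjoin(lst):
--     """Index-scan re-implementation: no pop/insert list surgery."""
--     pieces = []
--     i, n = 0, len(lst)
--     while i < n:
--         if i == n - 1:
--             pieces.append(str(lst[i]))
--             i += 1
--             continue
--         step = lst[i + 1] - lst[i]
--         j = i + 1
--         while j + 1 < n and lst[j + 1] - lst[j] == step:
--             j += 1
--         length = j - i + 1
--         if length >= 3:
--             if step > 1:
--                 pieces.append('%d..%d..%d' % (lst[i], lst[j], step))
--             elif step == 1:
--                 pieces.append('%d..%d' % (lst[i], lst[j]))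
--             else:
--                 pieces.append('%d*%d' % (length, lst[i]))
--             i = j + 1
--         elif n - i - 2 >= 2:
--             # a lone pair with grouping still possible afterwards: emit one
--             pieces.append(str(lst[i]))
--             i += 1
--         else:
--             pieces.append(str(lst[i]))
--             pieces.append(str(lst[i + 1]))
--             i += 2
--     return ', '.join(pieces)
-- ===== Notes on version B (the rewrite author's own statement) =====
-- stated objective: alternative
-- what changed: Replaced A's destructive while-loop (pop(0)/insert(0) on a working copy, group list rebuilt each round) with a single index scan that measures each equal-step run length directly and decides emission from the index arithmetic; no list mutation at all.
import Mathlib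
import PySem

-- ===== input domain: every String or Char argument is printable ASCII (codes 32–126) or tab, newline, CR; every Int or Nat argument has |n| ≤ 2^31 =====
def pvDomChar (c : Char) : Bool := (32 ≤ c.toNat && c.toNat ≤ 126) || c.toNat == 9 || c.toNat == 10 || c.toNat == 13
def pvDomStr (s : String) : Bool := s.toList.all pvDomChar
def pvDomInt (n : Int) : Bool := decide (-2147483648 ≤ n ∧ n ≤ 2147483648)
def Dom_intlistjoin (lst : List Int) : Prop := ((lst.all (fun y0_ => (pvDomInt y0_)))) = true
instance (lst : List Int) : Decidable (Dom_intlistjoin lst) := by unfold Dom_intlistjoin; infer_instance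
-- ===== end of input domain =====

-- B replaces A's destructive pop/insert grouping loop with a mutation-free index scan; same output (alternative decomposition, not claimed faster).

-- ===== PORT A =====
-- inner 'while items:' loop of A: grows `group` while the step stays constant,
-- pops the second element back onto `items` in the 2-and-enough-left case.
def pvInnerA (group : List Int) (items : List Int) : List Int × List Int :=
  match items with
  | [] => (group, [])
  | x :: rest =>
    if group.length = 1 ∨
        x - PySem.List.pyGetD group (-1) 0 =
          PySem.List.pyGetD group (-1) 0 - PySem.List.pyGetD group (-2) 0 then
      pvInnerA (group ++ [x]) rest
    else if group.length = 2 ∧ 2 ≤ (x :: rest).length then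
      (group.dropLast, PySem.List.pyGetD group (-1) 0 :: x :: rest)
    else
      (group, x :: rest)

-- the per-group formatting at the bottom of A's outer loop
def pvFmtA (group : List Int) : List String :=
  if group.length ≤ 2 then
    group.map PySem.Int.toStr
  else if PySem.List.pyGetD group 1 0 - PySem.List.pyGetD group 0 0 > 1 then
    [PySem.Int.toStr (PySem.List.pyGetD group 0 0) ++ ".." ++
      PySem.Int.toStr (PySem.List.pyGetD group (-1) 0) ++ ".." ++
      PySem.Int.toStr (PySem.List.pyGetD group 1 0 - PySem.List.pyGetD group 0 0)]
  else if PySem.List.pyGetD group 1 0 - PySem.List.pyGetD group 0 0 = 1 then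
    [PySem.Int.toStr (PySem.List.pyGetD group 0 0) ++ ".." ++
      PySem.Int.toStr (PySem.List.pyGetD group (-1) 0)]
  else
    [PySem.Int.toStr (group.length : Int) ++ "*" ++ PySem.Int.toStr (PySem.List.pyGetD group 0 0)]

-- length bookkeeping for the inner loop (used for the outer loop's termination)
theorem pvInnerA_len (items : List Int) : ∀ (g : List Int), 1 ≤ g.length →
    1 ≤ (pvInnerA g items).1.length ∧
      (pvInnerA g items).1.length + (pvInnerA g items).2.length = g.length + items.length := by
  induction items with
  | nil => intro g hg; simp [pvInnerA, hg]
  | cons x rest ih =>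
    intro g hg
    simp only [pvInnerA]
    split
    · have := ih (g ++ [x]) (by simp)
      simp at this ⊢
      omega
    · split
      · next h2 =>
        refine ⟨?_, ?_⟩ <;> simp <;> omega
      · simp; omega

-- outer 'while items:' loop of A, accumulating `rets`
def pvOuterA (items : List Int) : List String :=
  match items with
  | [] => []
  | x :: rest =>
    let gi := pvInnerA [x] rest
    pvFmtA gi.1 ++ pvOuterA gi.2
termination_by items.length
decreasing_by
  have h := pvInnerA_len rest [x] (by simp)
  simp at h ⊢
  omega

def intlistjoin (lst : List Int) : String :=
  PySem.Str.join ", " (pvOuterA lst)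

-- ===== PORT B =====
-- inner 'while j + 1 < n and lst[j+1] - lst[j] == step:' — number of extra run elements
def pvRunB (step : Int) (prev : Int) (rest : List Int) : Nat :=
  match rest with
  | [] => 0
  | y :: t => if y - prev = step then 1 + pvRunB step y t else 0

-- the index scan of Source B, expressed on the suffix lst[i:]
def pvGoB (l : List Int) : List String :=
  match l with
  | [] => []
  | [x] => [PySem.Int.toStr x]
  | x :: y :: rest =>
    let step := y - x
    let r := pvRunB step y rest
    if 1 ≤ r then
      let zlast := (rest.take r).getLastD y
      (if step > 1 then
        PySem.Int.toStr x ++ ".." ++ PySem.Int.toStr zlast ++ ".." ++ PySem.Int.toStr step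
      else if step = 1 then
        PySem.Int.toStr x ++ ".." ++ PySem.Int.toStr zlast
      else
        PySem.Int.toStr ((r + 2 : Nat) : Int) ++ "*" ++ PySem.Int.toStr x) :: pvGoB (rest.drop r)
    else if 2 ≤ rest.length then
      PySem.Int.toStr x :: pvGoB (y :: rest)
    else
      PySem.Int.toStr x :: PySem.Int.toStr y :: pvGoB rest
termination_by l.length
decreasing_by
  · simp [List.length_drop]; omega
  · simp
  · simp

def intlistjoin_alt (lst : List Int) : String :=
  PySem.Str.join ", " (pvGoB lst)

-- ===== PRECONDITION & SPEC =====
def Spec_intlistjoin (lst : List Int) (out : String) : Prop := out = intlistjoin_alt lst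
instance (lst : List Int) (out : String) : Decidable (Spec_intlistjoin lst out) := by unfold Spec_intlistjoin; infer_instance

-- ===== CLAIM (what is proved, stated in full; the proofs are below) =====
def Claim_equal_intlistjoin : Prop := ∀ (lst : List Int), Dom_intlistjoin lst → Spec_intlistjoin lst (intlistjoin lst)

-- ===== LEMMAS AND PROOFS =====

theorem pvGetD_neg1 (pre : List Int) (a b d : Int) :
    PySem.List.pyGetD (pre ++ [a, b]) (-1) d = b := by
  rw [show pre ++ [a, b] = (pre ++ [a]) ++ [b] by simp]
  exact PySem.List.pyGetD_neg_one_append_singleton ..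

theorem pvGetD_neg2 (pre : List Int) (a b d : Int) :
    PySem.List.pyGetD (pre ++ [a, b]) (-2) d = a := by
  rw [PySem.List.pyGetD_neg_ofNat (pre ++ [a, b]) 2 d (by omega) (by simp)]
  simp [List.getElem_append_right]

theorem pvGetD_one_two (x y : Int) (l : List Int) :
    PySem.List.pyGetD (x :: y :: l) 1 0 = y := by
  simp only [PySem.List.pyGetD, PySem.List.pyGet?, PySem.List.pyIdx?]
  norm_num

theorem pvGetLast_aux : ∀ (l : List Int) (x y : Int) (h : (x :: y :: l) ≠ []),
    (x :: y :: l).getLast h = l.getLastD y := by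
  intro l
  induction l with
  | nil => intro x y h; rfl
  | cons z l ih =>
    intro x y h
    show (y :: z :: l).getLast (by simp) = (z :: l).getLastD y
    rw [ih, List.getLastD_cons]

theorem pvGetD_last_two (x y : Int) (l : List Int) :
    PySem.List.pyGetD (x :: y :: l) (-1) 0 = l.getLastD y := by
  rw [PySem.List.pyGetD_neg_one]
  · exact pvGetLast_aux l x y _
  · simp

theorem pvRunB_le (step : Int) : ∀ (p : Int) (l : List Int), pvRunB step p l ≤ l.length := by
  intro p l
  induction l generalizing p with
  | nil => simp [pvRunB]
  | cons y t ih =>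
    simp only [pvRunB]
    split
    · have := ih y; simp; omega
    · simp

-- characterisation of A's inner loop via B's run counter
theorem pvInnerA_char (items : List Int) : ∀ (pre : List Int) (p' p : Int),
    pvInnerA (pre ++ [p', p]) items =
      (if 1 ≤ pvRunB (p - p') p items then
        ((pre ++ [p', p]) ++ items.take (pvRunB (p - p') p items),
          items.drop (pvRunB (p - p') p items))
      else if pre = [] ∧ 2 ≤ items.length then
        (pre ++ [p'], p :: items)
      else
        (pre ++ [p', p], items)) := by
  induction items with
  | nil => intro pre p' p; simp [pvInnerA, pvRunB]
  | cons x rest ih =>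
    intro pre p' p
    simp only [pvInnerA]
    rw [pvGetD_neg1, pvGetD_neg2]
    by_cases hx : x - p = p - p'
    · rw [if_pos (Or.inr hx)]
      have hrw : pvRunB (p - p') p (x :: rest) = 1 + pvRunB (p - p') x rest := by
        simp only [pvRunB, if_pos hx]
      have ih' := ih (pre ++ [p']) p x
      rw [hx] at ih'
      rw [show pre ++ [p', p] ++ [x] = (pre ++ [p']) ++ [p, x] by simp, ih', hrw]
      by_cases hr' : 1 ≤ pvRunB (p - p') x rest
      · rw [if_pos hr', if_pos (show 1 ≤ 1 + pvRunB (p - p') x rest by omega)]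
        rw [show 1 + pvRunB (p - p') x rest = pvRunB (p - p') x rest + 1 by omega]
        simp
      · have hr0 : pvRunB (p - p') x rest = 0 := by omega
        rw [if_neg hr', if_pos (show 1 ≤ 1 + pvRunB (p - p') x rest by omega)]
        rw [if_neg (show ¬(pre ++ [p'] = [] ∧ 2 ≤ rest.length) by simp)]
        simp [hr0]
    · rw [if_neg (show ¬((pre ++ [p', p]).length = 1 ∨ x - p = p - p') by
        rintro (h1 | h2)
        · simp only [List.length_append, List.length_cons, List.length_nil] at h1; omega
        · exact hx h2)]
      have hr0 : pvRunB (p - p') p (x :: rest) = 0 := by simp [pvRunB, hx]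
      rw [hr0, if_neg (show ¬(1 ≤ (0 : Nat)) by omega)]
      have hdl : (pre ++ [p', p]).dropLast = pre ++ [p'] := by
        rw [show pre ++ [p', p] = (pre ++ [p']) ++ [p] by simp, List.dropLast_concat]
      by_cases hc : pre = [] ∧ 2 ≤ (x :: rest).length
      · rw [if_pos (show (pre ++ [p', p]).length = 2 ∧ 2 ≤ (x :: rest).length from
          ⟨by simp [hc.1], hc.2⟩), if_pos hc, hdl]
      · rw [if_neg (show ¬((pre ++ [p', p]).length = 2 ∧ 2 ≤ (x :: rest).length) from
          fun h => hc ⟨by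
            have h1 := h.1
            simp only [List.length_append, List.length_cons, List.length_nil] at h1
            simpa [List.length_eq_zero_iff] using (by omega : pre.length = 0), h.2⟩), if_neg hc]

theorem pvOuter_eq_pvGo_aux : ∀ (n : Nat) (l : List Int), l.length ≤ n → pvOuterA l = pvGoB l := by
  intro n
  induction n with
  | zero =>
    intro l hl
    match l with
    | [] => simp [pvOuterA, pvGoB]
    | x :: t => simp at hl
  | succ n ih =>
    intro l hl
    match l with
    | [] => simp [pvOuterA, pvGoB]
    | [x] => simp [pvOuterA, pvGoB, pvInnerA, pvFmtA]
    | x :: y :: rest =>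
      have step2 : pvInnerA [x] (y :: rest) = pvInnerA [x, y] rest := by
        simp [pvInnerA]
      have key := pvInnerA_char rest [] x y
      simp only [List.nil_append, true_and] at key
      simp only [pvOuterA]
      rw [step2, key]
      simp only [pvGoB]
      simp only [List.length_cons] at hl
      by_cases hr : 1 ≤ pvRunB (y - x) y rest
      · rw [if_pos hr]
        rw [if_pos hr]
        set r := pvRunB (y - x) y rest with hrdef
        have hle : r ≤ rest.length := pvRunB_le (y - x) y rest
        have htk : (rest.take r).length = r := by rw [List.length_take]; omega
        have hfmt : pvFmtA ([x, y] ++ rest.take r) =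
            [(if y - x > 1 then
                PySem.Int.toStr x ++ ".." ++
                  PySem.Int.toStr ((rest.take r).getLastD y) ++ ".." ++ PySem.Int.toStr (y - x)
              else if y - x = 1 then
                PySem.Int.toStr x ++ ".." ++ PySem.Int.toStr ((rest.take r).getLastD y)
              else
                PySem.Int.toStr ((r + 2 : Nat) : Int) ++ "*" ++ PySem.Int.toStr x)] := by
          show pvFmtA (x :: y :: rest.take r) = _
          simp only [pvFmtA]
          rw [if_neg (show ¬((x :: y :: rest.take r).length ≤ 2) by
            simp only [List.length_cons, htk]; omega)]
          rw [pvGetD_one_two, PySem.List.pyGetD_zero_cons, pvGetD_last_two]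
          rw [show ((x :: y :: rest.take r).length : Int) = ((r + 2 : Nat) : Int) by
            simp only [List.length_cons, htk]
            try omega]
          split_ifs <;> rfl
        rw [hfmt, ih (rest.drop r) (by simp only [List.length_drop]; omega)]
        simp
      · rw [if_neg hr]
        rw [if_neg hr]
        by_cases hc : 2 ≤ rest.length
        · rw [if_pos hc, if_pos hc]
          rw [ih (y :: rest) (by simp only [List.length_cons]; omega)]
          simp [pvFmtA]
        · rw [if_neg hc, if_neg hc]
          rw [ih rest (by omega)]
          simp [pvFmtA]

theorem pvOuter_eq_pvGo (l : List Int) : pvOuterA l = pvGoB l :=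
  pvOuter_eq_pvGo_aux l.length l (le_refl _)

-- ===== VERDICT (by name: the statement is the Claim_ definition above) =====
theorem intlistjoin_spec : Claim_equal_intlistjoin := by
  intro lst _
  unfold Spec_intlistjoin intlistjoin intlistjoin_alt
  rw [pvOuter_eq_pvGo]
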